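-- pv_equiv track=rewrite | github.com/thisIsJooS/Problem-Solving-Hub | boj/2gold/2447.py | x3
-- ===== SOURCE A (Python) =====
-- def x3(arr):
--     ret = []
--     length = len(arr)
--
--     for i in range(length):
--         tmp = arr[i]*3
--         ret.append(tmp)
--
--     for i in range(length):
--         tmp = arr[i] + [' ']*length + arr[i]
--         ret.append(tmp)
--
--     for i in range(length):
--         tmp = arr[i]*3
--         ret.append(tmp)
--
--     return ret
-- ===== SOURCE B (Python) =====
-- def x3(arr):
--     mask = [(1, 1, 1), (1, 0, 1), (1, 1, 1)]
--     blank = [' '] * len(arr)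
--     return [sum((row if m else blank for m in band), [])
--             for band in mask for row in arr]
-- ===== Notes on version B (the rewrite author's own statement) =====
-- stated objective: alternative
-- what changed: Replaces the three hardcoded band loops with a single 3x3 boolean mask template: one comprehension concatenates, for each mask cell, the row or a blank row.
import Mathlib
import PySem

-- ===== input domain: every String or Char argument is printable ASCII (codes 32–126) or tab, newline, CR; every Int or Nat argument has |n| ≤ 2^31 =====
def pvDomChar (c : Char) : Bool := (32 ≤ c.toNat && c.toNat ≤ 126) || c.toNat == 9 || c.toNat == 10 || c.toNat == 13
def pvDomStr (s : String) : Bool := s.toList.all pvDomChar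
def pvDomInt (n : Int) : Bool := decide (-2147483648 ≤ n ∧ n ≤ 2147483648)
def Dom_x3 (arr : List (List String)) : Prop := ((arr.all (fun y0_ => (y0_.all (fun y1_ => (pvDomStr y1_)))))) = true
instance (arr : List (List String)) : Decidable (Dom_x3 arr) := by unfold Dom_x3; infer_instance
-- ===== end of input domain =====

-- B replaces A's three hardcoded band loops with a 3x3 boolean mask template driving one
-- double traversal (objective: alternative decomposition, same cost).

-- ===== PORT A =====
-- Each 'for i in range(length): ret.append(...)' loop is a foldl over arr appending one row.
def x3 (arr : List (List String)) : List (List String) :=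
  let length := arr.length
  let ret : List (List String) := []
  let ret := arr.foldl (fun ret row => ret ++ [row ++ row ++ row]) ret
  let ret := arr.foldl (fun ret row => ret ++ [row ++ List.replicate length " " ++ row]) ret
  let ret := arr.foldl (fun ret row => ret ++ [row ++ row ++ row]) ret
  ret

-- ===== PORT B =====
def x3_alt (arr : List (List String)) : List (List String) :=
  let mask : List (List Bool) := [[true, true, true], [true, false, true], [true, true, true]]
  let blank : List String := List.replicate arr.length " "
  mask.flatMap (fun band => arr.map (fun row => (band.map (fun m => if m then row else blank)).flatten))

-- ===== PRECONDITION & SPEC =====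
def Spec_x3 (arr : List (List String)) (out : List (List String)) : Prop := out = x3_alt arr
instance (arr : List (List String)) (out : List (List String)) : Decidable (Spec_x3 arr out) := by unfold Spec_x3; infer_instance

-- ===== CLAIM (what is proved, stated in full; the proofs are below) =====
def Claim_equal_x3 : Prop := ∀ (arr : List (List String)), Dom_x3 arr → Spec_x3 arr (x3 arr)

-- ===== LEMMAS AND PROOFS =====
theorem flatten_map_singleton {α β : Type} (f : α → β) (l : List α) :
    (l.map (fun x => [f x])).flatten = l.map f := by
  induction l with
  | nil => rfl
  | cons x xs ih => simp [ih]

-- ===== VERDICT (by name: the statement is the Claim_ definition above) =====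
theorem x3_spec : Claim_equal_x3 := by
  intro arr _
  show x3 arr = x3_alt arr
  simp [x3, x3_alt, List.flatMap, flatten_map_singleton, List.append_assoc]
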